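-- pv_equiv track=rewrite | github.com/console2002/microcap-pipeline | app/pipeline.py | _forms_support_runway
-- ===== SOURCE A (Python) =====
-- US_RUNWAY_FORM_PREFIXES = (
--     "10-Q",
--     "10-Q/A",
--     "10-QT",
--     "10-QT/A",
--     "10-K",
--     "10-K/A",
--     "10-KT",
--     "10-KT/A",
-- )
--
-- FPI_ANNUAL_FORM_PREFIXES = (
--     "20-F",
--     "20-F/A",
--     "40-F",
--     "40-F/A",
-- )
--
-- FPI_INTERIM_FORM_PREFIXES = (
--     "6-K",
--     "6-K/A",
-- )
--
-- def _forms_support_runway(forms: set[str], country: str) -> tuple[bool, str]: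
--     if not forms:
--         return False, "no filings in lookback window"
--
--     normalized_forms = {str(f).strip().upper() for f in forms if str(f).strip()}
--     if not normalized_forms:
--         return False, "filings missing form codes"
--
--     has_us_form = any(
--         form.startswith(prefix) for prefix in US_RUNWAY_FORM_PREFIXES for form in normalized_forms
--     )
--     if has_us_form:
--         return True, ""
--
--     has_fpi_annual = any(
--         form.startswith(prefix) for prefix in FPI_ANNUAL_FORM_PREFIXES for form in normalized_forms
--     )
--     has_fpi_interim = any(
--         form.startswith(prefix) for prefix in FPI_INTERIM_FORM_PREFIXES for form in normalized_forms
--     )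
--
--     if has_fpi_annual and has_fpi_interim:
--         return True, ""
--
--     if has_fpi_annual and not has_fpi_interim:
--         return False, "missing 6-K alongside annual FPI filing"
--
--     if has_fpi_interim and not has_fpi_annual:
--         return False, "missing 20-F/40-F alongside 6-K"
--
--     return False, "no qualifying core filing forms"
-- ===== SOURCE B (Python) =====
-- # Single pass over the forms with classification flags and early exit on a US form,
-- # using the minimal prefixes ("10-Q"/"10-K", "20-F"/"40-F", "6-K") that subsume the
-- # full prefix tuples, instead of building a normalized set and scanning it three times.
--
-- def _forms_support_runway(forms: set[str], country: str) -> tuple[bool, str]: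
--     if not forms:
--         return False, "no filings in lookback window"
--
--     has_us = has_annual = has_interim = has_any = False
--     for f in forms:
--         s = str(f).strip()
--         if not s:
--             continue
--         has_any = True
--         s = s.upper()
--         if s.startswith("10-Q") or s.startswith("10-K"):
--             has_us = True
--             break
--         if s.startswith("20-F") or s.startswith("40-F"):
--             has_annual = True
--         if s.startswith("6-K"):
--             has_interim = True
--
--     if has_us:
--         return True, ""
--     if not has_any:
--         return False, "filings missing form codes"
--     if has_annual and has_interim:
--         return True, ""
--     if has_annual:
--         return False, "missing 6-K alongside annual FPI filing"
--     if has_interim: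
--         return False, "missing 20-F/40-F alongside 6-K"
--     return False, "no qualifying core filing forms"
-- ===== Notes on version B (the rewrite author's own statement) =====
-- stated objective: faster
-- what changed: Replaces the build-a-normalized-set-then-three-any()-scans structure with a single early-exiting pass that classifies each form once using the minimal subsuming prefixes (10-Q/10-K, 20-F/40-F, 6-K) and accumulates flags.
import Mathlib
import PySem

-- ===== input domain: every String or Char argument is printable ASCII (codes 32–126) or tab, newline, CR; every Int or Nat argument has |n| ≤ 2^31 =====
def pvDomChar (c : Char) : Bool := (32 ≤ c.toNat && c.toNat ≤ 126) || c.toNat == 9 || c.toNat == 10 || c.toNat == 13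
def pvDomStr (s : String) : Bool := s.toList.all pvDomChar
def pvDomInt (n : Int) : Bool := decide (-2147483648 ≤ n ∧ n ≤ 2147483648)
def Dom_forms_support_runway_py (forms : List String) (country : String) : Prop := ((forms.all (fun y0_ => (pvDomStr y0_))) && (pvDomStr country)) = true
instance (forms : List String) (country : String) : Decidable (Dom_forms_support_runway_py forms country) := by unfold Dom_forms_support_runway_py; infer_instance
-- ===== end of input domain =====

-- B replaces A's build-a-normalized-set-then-three-any()-scans structure with a single
-- early-exiting pass that classifies each form once via the minimal subsuming prefixes
-- (objective: alternative decomposition, same result).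

-- ===== PORT A =====
def pvUsPrefixes : List String :=
  ["10-Q", "10-Q/A", "10-QT", "10-QT/A", "10-K", "10-K/A", "10-KT", "10-KT/A"]
def pvFpiAnnualPrefixes : List String := ["20-F", "20-F/A", "40-F", "40-F/A"]
def pvFpiInterimPrefixes : List String := ["6-K", "6-K/A"]

-- the set comprehension {str(f).strip().upper() for f in forms if str(f).strip()}:
-- the values in iteration order; the set built from them is PySem.Set.ofList of this list
def pvNorm (forms : List String) : List String :=
  forms.filterMap (fun f =>
    if PySem.Str.strip f = "" then none
    else some (PySem.Str.upper (PySem.Str.strip f)))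

def forms_support_runway_py (forms : List String) (country : String) : Bool × String :=
  if forms = [] then (false, "no filings in lookback window")
  else
    let normalizedForms : PySem.Set String := PySem.Set.ofList (pvNorm forms)
    if normalizedForms = [] then (false, "filings missing form codes")
    else
      let hasUsForm := pvUsPrefixes.any (fun prefx =>
        normalizedForms.any (fun form => PySem.Str.startswith form prefx))
      if hasUsForm then (true, "")
      else
        let hasFpiAnnual := pvFpiAnnualPrefixes.any (fun prefx =>
          normalizedForms.any (fun form => PySem.Str.startswith form prefx))
        let hasFpiInterim := pvFpiInterimPrefixes.any (fun prefx =>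
          normalizedForms.any (fun form => PySem.Str.startswith form prefx))
        if hasFpiAnnual && hasFpiInterim then (true, "")
        else if hasFpiAnnual && !hasFpiInterim then (false, "missing 6-K alongside annual FPI filing")
        else if hasFpiInterim && !hasFpiAnnual then (false, "missing 20-F/40-F alongside 6-K")
        else (false, "no qualifying core filing forms")

-- ===== PORT B =====
-- the single pass: returns (has_us, has_annual, has_interim, has_any); stops at the first US form
def pvLoopB : List String → Bool → Bool → Bool → Bool × Bool × Bool × Bool
  | [], ann, itm, anyn => (false, ann, itm, anyn)
  | f :: rest, ann, itm, anyn =>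
    let t := PySem.Str.strip f
    if t = "" then pvLoopB rest ann itm anyn
    else
      let s := PySem.Str.upper t
      if PySem.Str.startswith s "10-Q" || PySem.Str.startswith s "10-K" then
        (true, ann, itm, true)
      else
        pvLoopB rest
          (ann || (PySem.Str.startswith s "20-F" || PySem.Str.startswith s "40-F"))
          (itm || PySem.Str.startswith s "6-K") true

def forms_support_runway_py_alt (forms : List String) (country : String) : Bool × String :=
  if forms = [] then (false, "no filings in lookback window")
  else
    let r := pvLoopB forms false false false
    if r.1 then (true, "")
    else if r.2.2.2 = false then (false, "filings missing form codes")
    else if r.2.1 && r.2.2.1 then (true, "")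
    else if r.2.1 then (false, "missing 6-K alongside annual FPI filing")
    else if r.2.2.1 then (false, "missing 20-F/40-F alongside 6-K")
    else (false, "no qualifying core filing forms")

-- ===== PRECONDITION & SPEC =====
def Spec_forms_support_runway_py (forms : List String) (country : String) (out : Bool × String) : Prop := out = forms_support_runway_py_alt forms country
instance (forms : List String) (country : String) (out : Bool × String) : Decidable (Spec_forms_support_runway_py forms country out) := by unfold Spec_forms_support_runway_py; infer_instance

-- ===== CLAIM (what is proved, stated in full; the proofs are below) =====
def Claim_equal_forms_support_runway_py : Prop := ∀ (forms : List String) (country : String), Dom_forms_support_runway_py forms country → Spec_forms_support_runway_py forms country (forms_support_runway_py forms country)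

-- ===== LEMMAS AND PROOFS =====
def pvNrmF (f : String) : String := PySem.Str.upper (PySem.Str.strip f)
def pvIsUS (s : String) : Bool := PySem.Str.startswith s "10-Q" || PySem.Str.startswith s "10-K"
def pvIsANN (s : String) : Bool := PySem.Str.startswith s "20-F" || PySem.Str.startswith s "40-F"
def pvIsINT (s : String) : Bool := PySem.Str.startswith s "6-K"
def pvNB (f : String) : Bool := !(PySem.Str.strip f == "")   -- non-blank after strip

lemma pv_startswith_sub (s p q : String) (h : q.toList <+: p.toList) :
    PySem.Str.startswith s p = true → PySem.Str.startswith s q = true := by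
  simp only [PySem.Str.startswith_eq, PySem.Chars.startswith_iff]
  exact fun h2 => h.trans h2

lemma pv_usAny (s : String) :
    pvUsPrefixes.any (fun p => PySem.Str.startswith s p) = pvIsUS s := by
  rw [Bool.eq_iff_iff]
  simp only [pvUsPrefixes, pvIsUS, List.any_cons, List.any_nil, Bool.or_eq_true, Bool.or_false]
  constructor
  · rintro (h | h | h | h | h | h | h | h)
    · exact Or.inl h
    · exact Or.inl (pv_startswith_sub s _ _ (by decide) h)
    · exact Or.inl (pv_startswith_sub s _ _ (by decide) h)
    · exact Or.inl (pv_startswith_sub s _ _ (by decide) h)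
    · exact Or.inr h
    · exact Or.inr (pv_startswith_sub s _ _ (by decide) h)
    · exact Or.inr (pv_startswith_sub s _ _ (by decide) h)
    · exact Or.inr (pv_startswith_sub s _ _ (by decide) h)
  · rintro (h | h)
    · exact Or.inl h
    · exact Or.inr (Or.inr (Or.inr (Or.inr (Or.inl h))))

lemma pv_annAny (s : String) :
    pvFpiAnnualPrefixes.any (fun p => PySem.Str.startswith s p) = pvIsANN s := by
  rw [Bool.eq_iff_iff]
  simp only [pvFpiAnnualPrefixes, pvIsANN, List.any_cons, List.any_nil, Bool.or_eq_true, Bool.or_false]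
  constructor
  · rintro (h | h | h | h)
    · exact Or.inl h
    · exact Or.inl (pv_startswith_sub s _ _ (by decide) h)
    · exact Or.inr h
    · exact Or.inr (pv_startswith_sub s _ _ (by decide) h)
  · rintro (h | h)
    · exact Or.inl h
    · exact Or.inr (Or.inr (Or.inl h))

lemma pv_intAny (s : String) :
    pvFpiInterimPrefixes.any (fun p => PySem.Str.startswith s p) = pvIsINT s := by
  rw [Bool.eq_iff_iff]
  simp only [pvFpiInterimPrefixes, pvIsINT, List.any_cons, List.any_nil, Bool.or_eq_true, Bool.or_false]
  constructor
  · rintro (h | h)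
    · exact h
    · exact pv_startswith_sub s _ _ (by decide) h
  · exact fun h => Or.inl h

-- A's scan over the normalized set equals a scan over the original forms
lemma pv_scan_eq (forms : List String) (P : String → Bool) :
    (PySem.Set.ofList (pvNorm forms)).any P
      = forms.any (fun f => pvNB f && P (pvNrmF f)) := by
  rw [Bool.eq_iff_iff]
  simp only [List.any_eq_true, Bool.and_eq_true]
  constructor
  · rintro ⟨s, hs, hP⟩
    rw [PySem.Set.mem_ofList] at hs
    simp only [pvNorm, List.mem_filterMap] at hs
    obtain ⟨f, hf, hsome⟩ := hs
    by_cases hb : PySem.Str.strip f = ""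
    · simp [hb] at hsome
    · simp only [hb, if_false, Option.some.injEq] at hsome
      refine ⟨f, hf, ?_, ?_⟩
      · simp [pvNB, hb]
      · rw [pvNrmF, hsome]; exact hP
  · rintro ⟨f, hf, hnb, hP⟩
    refine ⟨pvNrmF f, ?_, hP⟩
    rw [PySem.Set.mem_ofList]
    simp only [pvNorm, List.mem_filterMap]
    refine ⟨f, hf, ?_⟩
    have hb : ¬ (PySem.Str.strip f = "") := by simpa [pvNB] using hnb
    simp [hb, pvNrmF]

lemma pv_any_swap {α β : Type} (l1 : List α) (l2 : List β) (f : β → α → Bool) :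
    l1.any (fun p => l2.any (fun s => f s p)) = l2.any (fun s => l1.any (fun p => f s p)) := by
  rw [Bool.eq_iff_iff]
  simp only [List.any_eq_true]
  tauto

-- A's emptiness check on the normalized set
lemma pv_norm_empty (forms : List String) :
    (PySem.Set.ofList (pvNorm forms) = ([] : List String)) ↔ forms.any pvNB = false := by
  constructor
  · intro h
    rw [List.any_eq_false]
    intro f hf
    by_contra hnb
    have hmem : pvNrmF f ∈ PySem.Set.ofList (pvNorm forms) := by
      rw [PySem.Set.mem_ofList]
      simp only [pvNorm, List.mem_filterMap]
      have hb : ¬ (PySem.Str.strip f = "") := by simpa [pvNB] using hnb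
      exact ⟨f, hf, by simp [hb, pvNrmF]⟩
    rw [h] at hmem
    exact (List.not_mem_nil) hmem
  · intro h
    rw [List.any_eq_false] at h
    have hn : pvNorm forms = [] := by
      rw [pvNorm, List.filterMap_eq_nil_iff]
      intro f hf
      have hb : PySem.Str.strip f = "" := by simpa [pvNB] using h f hf
      simp [hb]
    rw [hn]
    rfl

def pvHasUS (forms : List String) : Bool := forms.any (fun f => pvNB f && pvIsUS (pvNrmF f))
def pvHasANN (forms : List String) : Bool := forms.any (fun f => pvNB f && pvIsANN (pvNrmF f))
def pvHasINT (forms : List String) : Bool := forms.any (fun f => pvNB f && pvIsINT (pvNrmF f))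
def pvHasANY (forms : List String) : Bool := forms.any pvNB

lemma pv_loop_fst (l : List String) (a i n : Bool) :
    (pvLoopB l a i n).1 = pvHasUS l := by
  induction l generalizing a i n with
  | nil => rfl
  | cons f rest ih =>
    simp only [pvLoopB, pvHasUS, List.any_cons]
    by_cases hb : PySem.Str.strip f = ""
    · simp [hb, ih, pvNB, pvHasUS]
    · by_cases hus : pvIsUS (pvNrmF f) = true
      · simp only [hb, if_false]
        rw [if_pos (by simpa [pvIsUS, pvNrmF] using hus)]
        simp [pvNB, hb, hus]
      · simp only [hb, if_false]
        rw [if_neg (by simpa [pvIsUS, pvNrmF] using hus)]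
        simp [ih, pvNB, hus, pvHasUS]

lemma pv_loop_rest (l : List String) (a i n : Bool)
    (h : pvHasUS l = false) :
    pvLoopB l a i n = (false, a || pvHasANN l, i || pvHasINT l, n || pvHasANY l) := by
  induction l generalizing a i n with
  | nil => simp [pvLoopB, pvHasANN, pvHasINT, pvHasANY]
  | cons f rest ih =>
    rw [pvHasUS, List.any_cons] at h
    simp only [Bool.or_eq_false_iff, Bool.and_eq_false_iff] at h
    obtain ⟨h1, h2⟩ := h
    simp only [pvLoopB, pvHasANN, pvHasINT, pvHasANY, List.any_cons]
    by_cases hb : PySem.Str.strip f = ""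
    · have hnb : pvNB f = false := by simp [pvNB, hb]
      simp only [hb, if_true]
      rw [ih _ _ _ (show pvHasUS rest = false from h2)]
      simp [hnb, pvHasANN, pvHasINT, pvHasANY]
    · have hnb : pvNB f = true := by simp [pvNB, hb]
      have hus : pvIsUS (pvNrmF f) = false := by
        rcases h1 with h1 | h1
        · rw [hnb] at h1; exact absurd h1 (by simp)
        · exact h1
      simp only [hb, if_false]
      rw [if_neg (by simpa [pvIsUS, pvNrmF] using hus)]
      rw [ih _ _ _ (show pvHasUS rest = false from h2)]
      simp [pvIsANN, pvIsINT, pvNrmF, pvHasANN, pvHasINT, pvHasANY, Bool.or_assoc, hnb]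

lemma pv_us_imp_any (forms : List String) (h : pvHasUS forms = true) : pvHasANY forms = true := by
  rw [pvHasUS, List.any_eq_true] at h
  obtain ⟨f, hf, hp⟩ := h
  rw [pvHasANY, List.any_eq_true]
  exact ⟨f, hf, by simp only [Bool.and_eq_true] at hp; exact hp.1⟩

-- ===== VERDICT (by name: the statement is the Claim_ definition above) =====
theorem forms_support_runway_py_spec : Claim_equal_forms_support_runway_py := by
  intro forms country _
  unfold Spec_forms_support_runway_py forms_support_runway_py forms_support_runway_py_alt
  by_cases hnil : forms = []
  · simp [hnil]
  · simp only [if_neg hnil]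
    have hscanUS : pvUsPrefixes.any (fun p =>
        (PySem.Set.ofList (pvNorm forms)).any (fun form => PySem.Str.startswith form p)) = pvHasUS forms := by
      rw [pv_any_swap]
      rw [pv_scan_eq forms (fun s => pvUsPrefixes.any (fun p => PySem.Str.startswith s p))]
      simp only [pv_usAny, pvHasUS]
    have hscanANN : pvFpiAnnualPrefixes.any (fun p =>
        (PySem.Set.ofList (pvNorm forms)).any (fun form => PySem.Str.startswith form p)) = pvHasANN forms := by
      rw [pv_any_swap]
      rw [pv_scan_eq forms (fun s => pvFpiAnnualPrefixes.any (fun p => PySem.Str.startswith s p))]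
      simp only [pv_annAny, pvHasANN]
    have hscanINT : pvFpiInterimPrefixes.any (fun p =>
        (PySem.Set.ofList (pvNorm forms)).any (fun form => PySem.Str.startswith form p)) = pvHasINT forms := by
      rw [pv_any_swap]
      rw [pv_scan_eq forms (fun s => pvFpiInterimPrefixes.any (fun p => PySem.Str.startswith s p))]
      simp only [pv_intAny, pvHasINT]
    by_cases hany : pvHasANY forms = true
    · have hne : ¬ (PySem.Set.ofList (pvNorm forms) = ([] : List String)) := by
        rw [pv_norm_empty]
        rw [pvHasANY] at hany
        simp [hany]
      simp only [if_neg hne, hscanUS, hscanANN, hscanINT]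
      by_cases hus : pvHasUS forms = true
      · rw [if_pos hus]
        rw [pv_loop_fst forms false false false] at *
        simp [hus]
      · rw [if_neg hus]
        rw [pv_loop_rest forms false false false (by simpa using hus)]
        simp only [Bool.false_or, hany]
        cases hA : pvHasANN forms <;> cases hI : pvHasINT forms <;> simp
    · have he : PySem.Set.ofList (pvNorm forms) = ([] : List String) := by
        have hf : pvHasANY forms = false := by simpa using hany
        rw [pv_norm_empty]; exact hf
      rw [if_pos he]
      have hus : pvHasUS forms = false := by
        by_contra h
        exact hany (pv_us_imp_any forms (by simpa using h))
      rw [pv_loop_rest forms false false false hus]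
      simp only [Bool.false_or]
      have hany' : pvHasANY forms = false := by simpa using hany
      simp [hany']
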